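-- pv_equiv track=rewrite | github.com/mrmees/openauto-prodigy | tools/proto_decoder.py | decode_java_string
-- ===== SOURCE A (Python) =====
-- def decode_java_string(s):
--     """
--     Decode a Java string literal from source, handling Unicode escapes
--     and standard escape sequences.
--     """
--     # The string is already decoded by the Java decompiler into Unicode chars,
--     # but some escapes remain as \uXXXX, \b, \t, \n, \r, etc.
--     result = []
--     i = 0
--     while i < len(s):
--         if s[i] == '\\' and i + 1 < len(s):
--             next_c = s[i + 1]
--             if next_c == 'u' and i + 5 < len(s):
--                 # \uXXXX escape
--                 hex_str = s[i+2:i+6]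
--                 try:
--                     result.append(chr(int(hex_str, 16)))
--                     i += 6
--                     continue
--                 except ValueError:
--                     pass
--             elif next_c == 'b':
--                 result.append('\b')
--                 i += 2
--                 continue
--             elif next_c == 't':
--                 result.append('\t')
--                 i += 2
--                 continue
--             elif next_c == 'n':
--                 result.append('\n')
--                 i += 2
--                 continue
--             elif next_c == 'r':
--                 result.append('\r')
--                 i += 2
--                 continue
--             elif next_c == '\\':
--                 result.append('\\')
--                 i += 2
--                 continue
--             elif next_c == '"':
--                 result.append('"')
--                 i += 2
--                 continue
--         result.append(s[i])
--         i += 1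
--     return ''.join(result)
-- ===== SOURCE B (Python) =====
-- _ESCAPES = {'b': '\b', 't': '\t', 'n': '\n', 'r': '\r', '\\': '\\', '"': '"'}
--
--
-- def _u_escape(s, j):
--     """Value of the \\uXXXX escape whose backslash sits at index j, else None."""
--     if j + 5 < len(s):
--         try:
--             return chr(int(s[j + 2:j + 6], 16))
--         except ValueError:
--             pass
--     return None
--
--
-- def decode_java_string(s):
--     """
--     Decode a Java string literal from source, handling Unicode escapes
--     and standard escape sequences.
--
--     Run-based pass: str.find jumps to the next backslash and the whole
--     backslash-free run is copied in one slice; the escape character is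
--     resolved through a lookup table, with \\uXXXX handled by a helper.
--     """
--     out = []
--     i, n = 0, len(s)
--     while i < n:
--         j = s.find('\\', i)
--         if j < 0 or j + 1 >= n:
--             out.append(s[i:])
--             break
--         out.append(s[i:j])
--         c = s[j + 1]
--         if c == 'u':
--             u = _u_escape(s, j)
--             if u is not None:
--                 out.append(u)
--                 i = j + 6
--                 continue
--         repl = _ESCAPES.get(c)
--         if repl is not None:
--             out.append(repl)
--             i = j + 2
--         else:
--             out.append('\\')
--             i = j + 1
--     return ''.join(out)
-- ===== Notes on version B (the rewrite author's own statement) =====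
-- stated objective: faster
-- what changed: A inspects one character at a time in Python and resolves each escape through a chain of elif branches; B uses str.find to jump to the next backslash, copies each whole backslash-free run with a single slice (C-speed bulk copy), and resolves the escape character through a lookup table, with \uXXXX handled by a helper function.
import Mathlib
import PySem

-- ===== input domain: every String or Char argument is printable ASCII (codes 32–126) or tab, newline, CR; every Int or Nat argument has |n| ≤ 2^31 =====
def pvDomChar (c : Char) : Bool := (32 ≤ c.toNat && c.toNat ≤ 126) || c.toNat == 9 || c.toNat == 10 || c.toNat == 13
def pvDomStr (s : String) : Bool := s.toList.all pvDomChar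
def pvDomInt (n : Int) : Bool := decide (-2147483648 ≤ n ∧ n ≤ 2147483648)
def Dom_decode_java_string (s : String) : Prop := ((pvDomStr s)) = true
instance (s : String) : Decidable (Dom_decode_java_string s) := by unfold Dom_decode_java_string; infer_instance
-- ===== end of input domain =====

-- B replaces A's char-at-a-time scan and branch cascade by a run-based pass: str.find locates the
-- next backslash, the whole backslash-free run is copied in one slice, and the escape character is
-- resolved through a lookup table (objective: faster by a constant factor, measured).

-- ===== PORT A =====

-- chr(n): exact on Unicode scalar values; none where Python raises ValueError (n < 0 or n > 0x10FFFF)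
-- and at surrogates 0xD800-0xDFFF, where Python returns a lone surrogate no Lean Char/String can hold
-- (those inputs are excluded by Pre_decode_java_string).
def pyChr? (n : Int) : Option Char :=
  if 0 <= n && (n < 55296 || (57344 <= n && n <= 1114111)) then some (Char.ofNat n.toNat) else none

-- chr(int(h, 16)) with ValueError caught: both sources contain this exact compound.
def chrIntHex? (h : List Char) : Option Char :=
  (PySem.Int.ofCharsBase? h 16).bind pyChr?

-- A's while loop; fuel = remaining loop iterations (cs.length suffices: i advances each pass).
def loopA (cs : List Char) : Nat → Nat → List Char
  | 0, _ => []
  | fuel+1, i =>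
    if hi : i < cs.length then
      if h2 : cs[i]'hi = '\\' ∧ i + 1 < cs.length then
        let nc := cs[i+1]'h2.2
        if nc = 'u' ∧ i + 5 < cs.length then
          match chrIntHex? (PySem.List.slice cs (some ((i+2 : Nat) : Int)) (some ((i+6 : Nat) : Int))) with
          | some c => c :: loopA cs fuel (i+6)
          | none => (cs[i]'hi) :: loopA cs fuel (i+1)
        else if nc = 'b' then '\x08' :: loopA cs fuel (i+2)
        else if nc = 't' then '\t' :: loopA cs fuel (i+2)
        else if nc = 'n' then '\n' :: loopA cs fuel (i+2)
        else if nc = 'r' then '\r' :: loopA cs fuel (i+2)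
        else if nc = '\\' then '\\' :: loopA cs fuel (i+2)
        else if nc = '"' then '"' :: loopA cs fuel (i+2)
        else (cs[i]'hi) :: loopA cs fuel (i+1)
      else (cs[i]'hi) :: loopA cs fuel (i+1)
    else []

def decode_java_string (s : String) : String := String.ofList (loopA s.toList s.toList.length 0)

-- ===== PORT B =====

-- B's module-level _ESCAPES table.
def pvEscDict : PySem.Dict Char Char :=
  PySem.Dict.ofList [('b', '\x08'), ('t', '\t'), ('n', '\n'), ('r', '\r'), ('\\', '\\'), ('"', '"')]

-- B's helper _u_escape(s, j): the value of the \uXXXX escape at backslash position j, else None.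
def uEscape? (cs : List Char) (j : Nat) : Option Char :=
  if j + 5 < cs.length then
    chrIntHex? (PySem.List.slice cs (some ((j+2 : Nat) : Int)) (some ((j+6 : Nat) : Int)))
  else none

-- B's while loop: it appends whole CHUNKS to `out` (List (List Char), flattened at the join);
-- `u` folds Python's `if c == 'u': u = _u_escape(s, j)` (u stays None when c ≠ 'u').
-- fuel = remaining loop iterations (cs.length suffices: i advances each pass).
def loopB (cs : List Char) : Nat → Nat → List (List Char)
  | 0, _ => []
  | fuel+1, i =>
    if i < cs.length then
      let j := PySem.Chars.findFrom cs ['\\'] (i : Int) none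
      if hj : j < 0 ∨ ¬ (j.toNat + 1 < cs.length) then
        [PySem.List.slice cs (some (i : Int)) none]            -- s[i:], then break
      else
        let run := PySem.List.slice cs (some (i : Int)) (some j)   -- s[i:j]
        let c := cs[j.toNat + 1]'(not_not.mp (not_or.mp hj).2)
        let u : Option Char := if c = 'u' then uEscape? cs j.toNat else none
        match u with
        | some uc => run :: [uc] :: loopB cs fuel (j.toNat + 6)
        | none =>
          match pvEscDict.get? c with
          | some repl => run :: [repl] :: loopB cs fuel (j.toNat + 2)
          | none => run :: ['\\'] :: loopB cs fuel (j.toNat + 1)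
    else []

def decode_java_string_alt (s : String) : String :=
  String.ofList (loopB s.toList s.toList.length 0).flatten

-- ===== PRECONDITION & SPEC =====

def pvIsHex (c : Char) : Bool :=
  ('0' ≤ c && c ≤ '9') || ('a' ≤ c && c ≤ 'f') || ('A' ≤ c && c ≤ 'F')

-- a \uXXXX escape whose four hex digits name a UTF-16 surrogate (0xD800–0xDFFF) starts at index i
def pvSurrEscAt (cs : List Char) (i : Nat) : Bool :=
  decide (i + 5 < cs.length) && (cs.getD i ' ' == '\\') && (cs.getD (i+1) ' ' == 'u') &&
  ((cs.getD (i+2) ' ' == 'D') || (cs.getD (i+2) ' ' == 'd')) &&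
  (['8','9','A','B','C','D','E','F','a','b','c','d','e','f'].contains (cs.getD (i+3) ' ')) &&
  pvIsHex (cs.getD (i+4) ' ') && pvIsHex (cs.getD (i+5) ' ')

-- Pre_ excludes strings containing a \uXXXX escape that decodes to a UTF-16 surrogate: there A
-- returns a string holding a lone surrogate, which is not a Unicode scalar value and so not a
-- value of the Lean type String.
def Pre_decode_java_string (s : String) : Prop :=
  ∀ i, i < s.toList.length → pvSurrEscAt s.toList i = false
instance (s : String) : Decidable (Pre_decode_java_string s) := by
  unfold Pre_decode_java_string; infer_instance

def pvWitness_decode_java_string : String := "a\\u0041\\n\\q"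

def Spec_decode_java_string (s : String) (out : String) : Prop := out = decode_java_string_alt s
instance (s : String) (out : String) : Decidable (Spec_decode_java_string s out) := by
  unfold Spec_decode_java_string; infer_instance

-- ===== CLAIM (what is proved, stated in full; the proofs are below) =====
def Claim_equal_decode_java_string : Prop :=
  ∀ (s : String), Dom_decode_java_string s → Pre_decode_java_string s →
    Spec_decode_java_string s (decode_java_string s)

-- ===== LEMMAS AND PROOFS =====

lemma loopA_stop (cs : List Char) (fuel i : Nat) (hi : ¬ i < cs.length) : loopA cs fuel i = [] := by
  cases fuel with
  | zero => rfl
  | succ fuel => rw [loopA, dif_neg hi]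

lemma loopB_stop (cs : List Char) (fuel i : Nat) (hi : ¬ i < cs.length) : loopB cs fuel i = [] := by
  cases fuel with
  | zero => rfl
  | succ fuel => rw [loopB, if_neg hi]

lemma loopA_step_copy (cs : List Char) (fuel i : Nat) (hi : i < cs.length)
    (hnb : cs[i]'hi ≠ '\\') : loopA cs (fuel+1) i = (cs[i]'hi) :: loopA cs fuel (i+1) := by
  rw [loopA, dif_pos hi, dif_neg (fun h => hnb h.1)]

-- A's loop copies a backslash-free tail verbatim
lemma loopA_no_bs (cs : List Char) : ∀ n i, cs.length - i ≤ n →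
    (∀ k, (hk : k < cs.length) → i ≤ k → cs[k]'hk ≠ '\\') → loopA cs n i = cs.drop i := by
  intro n
  induction n with
  | zero => intro i h _; rw [loopA_stop cs 0 i (by omega), List.drop_eq_nil_of_le (by omega)]
  | succ n ih =>
    intro i h hnb
    by_cases hi : i < cs.length
    · rw [loopA_step_copy cs n i hi (hnb i hi le_rfl), ih (i+1) (by omega)
          (fun k hk hik => hnb k hk (by omega)), List.drop_eq_getElem_cons hi]
    · rw [loopA_stop cs (n+1) i hi, List.drop_eq_nil_of_le (by omega)]

-- A's loop copies a backslash-free run [i, j) verbatim and continues at j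
lemma loopA_copy_to (cs : List Char) : ∀ d i j n, j - i ≤ d → i ≤ j → j ≤ cs.length →
    (∀ k, (hk : k < cs.length) → i ≤ k → k < j → cs[k]'hk ≠ '\\') → cs.length - i ≤ n →
    loopA cs n i = List.take (j - i) (List.drop i cs) ++ loopA cs (n - (j - i)) j := by
  intro d
  induction d with
  | zero =>
    intro i j n h hij _ _ _
    have : j = i := by omega
    subst this; simp
  | succ d ih =>
    intro i j n h hij hlen hnb hn
    by_cases hji : i = j
    · subst hji; simp
    · have hi : i < cs.length := by omega
      obtain ⟨n', rfl⟩ : ∃ n', n = n'+1 := ⟨n-1, by omega⟩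
      rw [loopA_step_copy cs n' i hi (hnb i hi le_rfl (by omega)),
          ih (i+1) j n' (by omega) (by omega) hlen
            (fun k hk h1 h2 => hnb k hk (by omega) h2) (by omega)]
      rw [List.drop_eq_getElem_cons hi]
      have he : j - i = (j - (i+1)) + 1 := by omega
      have hf : n' - (j - (i+1)) = n' + 1 - (j - i) := by omega
      rw [he, List.take_succ_cons, hf]
      simp
      rw [hf]

lemma prefix_singleton_drop (c : Char) (cs : List Char) (k : Nat) (h : [c] <+: cs.drop k) :
    ∃ hk : k < cs.length, cs[k]'hk = c := by
  rcases h with ⟨t, ht⟩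
  rw [List.singleton_append] at ht
  have hk : k < cs.length := by
    by_contra hk
    rw [List.drop_eq_nil_of_le (by omega)] at ht
    exact (List.cons_ne_nil c t) ht
  rw [List.drop_eq_getElem_cons hk] at ht
  injection ht with h1 _
  exact ⟨hk, h1.symm⟩

lemma not_prefix_singleton_drop (c : Char) (cs : List Char) (k : Nat) (hk : k < cs.length)
    (h : ¬ [c] <+: cs.drop k) : cs[k]'hk ≠ c := by
  intro he
  exact h (by rw [List.drop_eq_getElem_cons hk, he]; exact ⟨_, rfl⟩)

lemma mem_drop_of_getElem (cs : List Char) (i k : Nat) (hk : k < cs.length) (hik : i ≤ k) :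
    cs[k]'hk ∈ cs.drop i := by
  have hlt : k - i < (cs.drop i).length := by rw [List.length_drop]; omega
  have : (cs.drop i)[k - i]'hlt = cs[k]'hk := by
    rw [List.getElem_drop]
    congr 1
    omega
  rw [← this]
  exact List.getElem_mem hlt

-- B's escape table, characterised on an arbitrary key
lemma escDict_get (c : Char) : pvEscDict.get? c =
    if c = 'b' then some '\x08' else if c = 't' then some '\t' else if c = 'n' then some '\n'
    else if c = 'r' then some '\r' else if c = '\\' then some '\\' else if c = '"' then some '"'
    else none := by
  have h : pvEscDict = PySem.Dict.mk
      [('b', '\x08'), ('t', '\t'), ('n', '\n'), ('r', '\r'), ('\\', '\\'), ('"', '"')] := by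
    decide
  rw [h]
  simp only [PySem.Dict.get?_mk_cons, beq_iff_eq]
  split_ifs <;> try rfl
  all_goals simp_all [eq_comm]

-- the main equivalence of the two loops
lemma loopB_eq_loopA (cs : List Char) : ∀ n i m, cs.length - i ≤ n → cs.length - i ≤ m →
    (loopB cs n i).flatten = loopA cs m i := by
  intro n
  induction n using Nat.strong_induction_on with
  | _ n ihn =>
    intro i m hn hm
    by_cases hi : i < cs.length
    · obtain ⟨n', rfl⟩ : ∃ n', n = n'+1 := ⟨n-1, by omega⟩
      rw [loopB, if_pos hi]
      set j := PySem.Chars.findFrom cs ['\\'] (i : Int) none with hjdef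
      by_cases hj : j < 0 ∨ ¬ (j.toNat + 1 < cs.length)
      · rw [dif_pos hj]
        rw [show ([PySem.List.slice cs (some (i : Int)) none]).flatten
              = PySem.List.slice cs (some (i : Int)) none by simp]
        rw [PySem.List.slice_from_natCast]
        by_cases hneg : j < 0
        · -- no backslash from i on: A copies the tail
          have hne : j = -1 := by
            by_contra hne
            have h1 := (PySem.Chars.findFrom_natCast_spec cs ['\\'] i (le_of_lt hi) hne).1
            rw [← hjdef] at h1
            omega
          have hinf : ¬ ['\\'] <:+: cs.drop i :=
            (PySem.Chars.findFrom_natCast_eq_neg_one_iff cs ['\\'] i (le_of_lt hi)).mp (hjdef ▸ hne)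
          refine (loopA_no_bs cs m i hm ?_).symm
          intro k hk hik he
          exact hinf ((List.singleton_infix_iff _ _).mpr (he ▸ mem_drop_of_getElem cs i k hk hik))
        · -- backslash found at the last position: A copies the run then the lone backslash
          have hj2 : ¬ (j.toNat + 1 < cs.length) := by
            rcases hj with h' | h'
            · exact absurd h' hneg
            · exact h'
          have hne : j ≠ -1 := by omega
          have hs := PySem.Chars.findFrom_natCast_spec cs ['\\'] i (le_of_lt hi) hne
          rw [← hjdef] at hs
          obtain ⟨hk, hbs⟩ := prefix_singleton_drop '\\' cs j.toNat hs.2.1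
          have hij : i ≤ j.toNat := by omega
          have hjlast : j.toNat + 1 = cs.length := by omega
          rw [loopA_copy_to cs (j.toNat - i) i j.toNat m le_rfl hij (le_of_lt hk)
              (fun k hk' h1 h2 => not_prefix_singleton_drop '\\' cs k hk' (hs.2.2 k h1 h2)) hm]
          obtain ⟨m', hm'⟩ : ∃ m', m - (j.toNat - i) = m'+1 := ⟨m - (j.toNat - i) - 1, by omega⟩
          rw [hm', loopA, dif_pos hk, dif_neg (by rw [hbs]; omega), hbs,
              loopA_stop cs m' (j.toNat + 1) (by omega)]
          conv_lhs => rw [← List.take_append_drop (j.toNat - i) (cs.drop i)]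
          rw [List.drop_drop]
          congr 1
          have hidx : i + (j.toNat - i) = j.toNat := by omega
          rw [hidx, List.drop_eq_getElem_cons hk, hbs, List.drop_eq_nil_of_le (by omega)]
      · rw [dif_neg hj]
        have hj0 : ¬ j < 0 := (not_or.mp hj).1
        have hj1 : j.toNat + 1 < cs.length := not_not.mp (not_or.mp hj).2
        have hne : j ≠ -1 := by omega
        have hs := PySem.Chars.findFrom_natCast_spec cs ['\\'] i (le_of_lt hi) hne
        rw [← hjdef] at hs
        obtain ⟨hk, hbs⟩ := prefix_singleton_drop '\\' cs j.toNat hs.2.1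
        have hij : i ≤ j.toNat := by omega
        have hrun : PySem.List.slice cs (some (i : Int)) (some j) =
            List.take (j.toNat - i) (List.drop i cs) := by
          rw [PySem.List.slice_toNat cs (a := ((i : Nat) : Int)) (b := j) (by omega) (by omega)]
          simp
        rw [loopA_copy_to cs (j.toNat - i) i j.toNat m le_rfl hij (le_of_lt hk)
            (fun k hk' h1 h2 => not_prefix_singleton_drop '\\' cs k hk' (hs.2.2 k h1 h2)) hm]
        obtain ⟨m', hm'⟩ : ∃ m', m - (j.toNat - i) = m'+1 := ⟨m - (j.toNat - i) - 1, by omega⟩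
        rw [hm', loopA, dif_pos hk,
            dif_pos (⟨hbs, hj1⟩ : cs[j.toNat]'hk = '\\' ∧ j.toNat + 1 < cs.length)]
        simp only [← hjdef, hrun, hbs, uEscape?, escDict_get]
        set nc := cs[j.toNat + 1]'hj1 with hnc
        by_cases hu : nc = 'u'
        · by_cases hg : j.toNat + 5 < cs.length
          · rw [if_pos hu, if_pos hg,
                if_pos (⟨hu, hg⟩ : nc = 'u' ∧ j.toNat + 5 < cs.length)]
            rcases hO : chrIntHex? (PySem.List.slice cs (some ((j.toNat+2 : Nat) : Int))
                (some ((j.toNat+6 : Nat) : Int))) with _ | c'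
            · simp only [hu]
              rw [if_neg (show ¬('u':Char) = 'b' by decide), if_neg (show ¬('u':Char) = 't' by decide),
                if_neg (show ¬('u':Char) = 'n' by decide), if_neg (show ¬('u':Char) = 'r' by decide),
                if_neg (show ¬('u':Char) = '\\' by decide), if_neg (show ¬('u':Char) = '"' by decide)]
              simp only [List.flatten_cons, List.singleton_append]
              rw [ihn n' (by omega) (j.toNat+1) m' (by omega) (by omega)]
            · simp only [List.flatten_cons, List.singleton_append]
              rw [ihn n' (by omega) (j.toNat+6) m' (by omega) (by omega)]
          · rw [if_pos hu, if_neg hg,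
                if_neg (fun hcon : nc = 'u' ∧ j.toNat + 5 < cs.length => hg hcon.2)]
            simp only [hu]
            rw [if_neg (show ¬('u':Char) = 'b' by decide), if_neg (show ¬('u':Char) = 't' by decide),
                if_neg (show ¬('u':Char) = 'n' by decide), if_neg (show ¬('u':Char) = 'r' by decide),
                if_neg (show ¬('u':Char) = '\\' by decide), if_neg (show ¬('u':Char) = '"' by decide)]
            simp only [List.flatten_cons, List.singleton_append]
            rw [ihn n' (by omega) (j.toNat+1) m' (by omega) (by omega)]
            rw [if_neg (show ¬('u':Char) = 'b' by decide), if_neg (show ¬('u':Char) = 't' by decide),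
              if_neg (show ¬('u':Char) = 'n' by decide), if_neg (show ¬('u':Char) = 'r' by decide),
              if_neg (show ¬('u':Char) = '\\' by decide), if_neg (show ¬('u':Char) = '"' by decide)]
        · rw [if_neg hu, if_neg (fun hcon : nc = 'u' ∧ j.toNat + 5 < cs.length => hu hcon.1)]
          split_ifs <;>
            simp only [List.flatten_cons, List.singleton_append] <;>
            first
              | rw [ihn n' (by omega) (j.toNat+2) m' (by omega) (by omega)]
              | (rw [ihn n' (by omega) (j.toNat+1) m' (by omega) (by omega)]; try simp)
    · rw [loopB_stop cs n i hi, loopA_stop cs m i hi]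
      simp

-- ===== VERDICT (by name: the statement is the Claim_ definition above) =====
theorem decode_java_string_spec : Claim_equal_decode_java_string := by
  intro s _ _
  unfold Spec_decode_java_string decode_java_string decode_java_string_alt
  exact congrArg String.ofList
    (loopB_eq_loopA s.toList s.toList.length 0 s.toList.length (by omega) (by omega)).symm
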